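-- pv_equiv track=rewrite | github.com/bolna-ai/bolna | bolna/synthesizer/base_synthesizer.py | text_chunker
-- ===== SOURCE A (Python) =====
-- def text_chunker(text):
--     """Split text into chunks, keeping XML/SSML tags as atomic standalone
--     chunks (required for ElevenLabs SSML parsing in streaming mode).
--     Paired tags like <say-as>content</say-as> are kept as single chunks."""
--     splitters = (".", ",", "?", "!", ";", ":", "—", "-", "(", ")", "[", "]", "}", " ")
--
--     buffer = ""
--     inside_tag = False
--     inside_element = False
--     for char in text:
--         buffer += char
--         if char == "<":
--             inside_tag = True
--         elif char == ">" and inside_tag: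
--             inside_tag = False
--             tag_text = buffer[buffer.rfind("<"):]
--             if tag_text.startswith("</"):
--                 inside_element = False
--             elif not tag_text.rstrip().endswith("/>"):
--                 inside_element = True
--             continue
--         if not inside_tag and not inside_element and char in splitters:
--             if buffer != " ":
--                 yield buffer.strip() + " "
--             buffer = ""
--
--     if buffer:
--         yield buffer.strip() + " "
-- ===== SOURCE B (Python) =====
-- def text_chunker(text):
--     """Single linear pass tracking indices into `text` instead of growing a
--     buffer and rescanning it with rfind; returns the list of chunks."""
--     splitters = frozenset(".,?!;:\u2014-()[]} ")
--     out = []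
--     start = 0            # start index of the current chunk
--     last_lt = -1         # index of the most recent '<' in the current chunk
--     inside_tag = False
--     inside_element = False
--     for i, ch in enumerate(text):
--         if ch == "<":
--             inside_tag = True
--             last_lt = i
--         elif ch == ">" and inside_tag:
--             inside_tag = False
--             if text[last_lt + 1] == "/":
--                 inside_element = False
--             elif text[i - 1] != "/":
--                 inside_element = True
--             continue
--         if not inside_tag and not inside_element and ch in splitters:
--             if not (start == i and ch == " "):
--                 out.append(text[start:i + 1].strip() + " ")
--             start = i + 1
--     if start < len(text):
--         out.append(text[start:].strip() + " ")
--     return out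
-- ===== Notes on version B (the rewrite author's own statement) =====
-- stated objective: faster
-- what changed: Replaced the growing string buffer with per-'>' rfind rescans by a single linear pass that tracks the chunk-start index and the index of the most recent '<', emitting chunks as slices of the input.
import Mathlib
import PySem

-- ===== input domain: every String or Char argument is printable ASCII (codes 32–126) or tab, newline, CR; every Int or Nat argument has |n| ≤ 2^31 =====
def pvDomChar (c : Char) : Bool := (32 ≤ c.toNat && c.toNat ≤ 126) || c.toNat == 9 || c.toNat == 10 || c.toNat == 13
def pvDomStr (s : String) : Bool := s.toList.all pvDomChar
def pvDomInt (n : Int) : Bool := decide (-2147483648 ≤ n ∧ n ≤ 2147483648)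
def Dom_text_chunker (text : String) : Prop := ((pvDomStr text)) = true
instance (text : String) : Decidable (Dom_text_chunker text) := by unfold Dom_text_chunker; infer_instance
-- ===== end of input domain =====

-- B replaces A's growing buffer + rfind rescanning by a single pass tracking chunk-start
-- and last-'<' indices into the input (objective: faster; see claim).


-- ===== PORT A =====
-- splitters tuple of A
def pvSplittersA : List Char := ['.', ',', '?', '!', ';', ':', '—', '-', '(', ')', '[', ']', '}', ' ']

-- A's generator loop; the returned list is the sequence of yields.  Python's
-- 'if char == "<"'/'elif char == ">" and inside_tag' ladder is rendered with the
-- (mutually exclusive) '>'-branch tested first so that the fall-through splitter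
-- check can be written once; behaviour is identical char for char.
def pvA_loop (cs : List Char) (buffer : List Char) (insideTag insideElem : Bool) : List String :=
  match cs with
  | [] =>
      -- 'if buffer: yield buffer.strip() + " "'
      if buffer ≠ [] then [String.mk (PySem.Chars.strip buffer ++ [' '])] else []
  | c :: rest =>
      let buffer := buffer ++ [c]                    -- buffer += char
      if c = '>' ∧ insideTag = true then
        -- tag_text = buffer[buffer.rfind("<"):]
        let tagText := PySem.Chars.slice buffer (some (PySem.Chars.rfind buffer ['<'])) none
        let insideElem :=
          if PySem.Chars.startswith tagText ['<', '/'] then false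
          else if ¬ (PySem.Chars.endswith (PySem.Chars.rstrip tagText) ['/', '>'] = true) then true
          else insideElem
        pvA_loop rest buffer false insideElem        -- 'continue'
      else
        let insideTag := if c = '<' then true else insideTag
        if insideTag = false ∧ insideElem = false ∧ c ∈ pvSplittersA then
          (if buffer ≠ [' '] then [String.mk (PySem.Chars.strip buffer ++ [' '])] else [])
            ++ pvA_loop rest [] insideTag insideElem
        else
          pvA_loop rest buffer insideTag insideElem

def text_chunker (text : String) : List String :=
  pvA_loop text.toList [] false false

-- ===== PORT B =====
-- frozenset of splitters in Source B
def pvSplittersB : PySem.Set Char :=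
  PySem.Set.ofList ['.', ',', '?', '!', ';', ':', '—', '-', '(', ')', '[', ']', '}', ' ']

-- B's single pass: 'full' is the whole text, 'cs' the remaining suffix starting at
-- index i ('for i, ch in enumerate(text)'), 'start' the current chunk start,
-- 'lastLt' the index of the most recent '<'; chunks are slices of 'full'.
def pvB_loop (full : List Char) (cs : List Char) (i : Nat) (out : List String)
    (start : Nat) (lastLt : Int) (insideTag insideElem : Bool) : List String :=
  match cs with
  | [] =>
      if start < full.length then
        out ++ [String.mk (PySem.Chars.strip (PySem.List.slice full (some (start : Int)) none) ++ [' '])]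
      else out
  | c :: rest =>
      if c = '>' ∧ insideTag = true then
        let insideElem :=
          if PySem.List.pyGet? full (lastLt + 1) = some '/' then false
          else if ¬ (PySem.List.pyGet? full ((i : Int) - 1) = some '/') then true
          else insideElem
        pvB_loop full rest (i + 1) out start lastLt false insideElem
      else
        let p := if c = '<' then (true, (i : Int)) else (insideTag, lastLt)
        if p.1 = false ∧ insideElem = false ∧ c ∈ pvSplittersB then
          let out :=
            if ¬ (start = i ∧ c = ' ') then
              out ++ [String.mk (PySem.Chars.strip
                (PySem.List.slice full (some (start : Int)) (some ((i : Int) + 1))) ++ [' '])]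
            else out
          pvB_loop full rest (i + 1) out (i + 1) p.2 p.1 insideElem
        else
          pvB_loop full rest (i + 1) out start p.2 p.1 insideElem

def text_chunker_alt (text : String) : List String :=
  pvB_loop text.toList text.toList 0 [] 0 (-1) false false

-- ===== PRECONDITION & SPEC =====
def Spec_text_chunker (text : String) (out : List String) : Prop := out = text_chunker_alt text
instance (text : String) (out : List String) : Decidable (Spec_text_chunker text out) := by unfold Spec_text_chunker; infer_instance

-- ===== CLAIM (what is proved, stated in full; the proofs are below) =====
def Claim_equal_text_chunker : Prop := ∀ (text : String), Dom_text_chunker text → Spec_text_chunker text (text_chunker text)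

-- ===== LEMMAS AND PROOFS =====

theorem pv_singleton_isPrefixOf (c : Char) (l : List Char) :
    [c].isPrefixOf l = true ↔ l[0]? = some c := by
  rw [List.isPrefixOf_iff_prefix]
  cases l with
  | nil => simp
  | cons a t => simp [List.cons_prefix_cons, eq_comm]

theorem pv_rfind_go (s : List Char) (c : Char) (k p : Nat) (hp : p ≤ k)
    (hc : s[p]? = some c) (hlast : ∀ j, p < j → j ≤ k → s[j]? ≠ some c) :
    PySem.Chars.rfind.go s [c] k = (p : Int) := by
  induction k with
  | zero =>
      have hp0 : p = 0 := Nat.le_zero.mp hp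
      subst hp0
      have h : [c].isPrefixOf s = true := (pv_singleton_isPrefixOf c s).mpr hc
      rw [PySem.Chars.rfind.go.eq_1, if_pos h]
      rfl
  | succ j ih =>
      by_cases hpe : p = j + 1
      · subst hpe
        have : [c].isPrefixOf (s.drop (j + 1)) = true := by
          rw [pv_singleton_isPrefixOf]
          simpa using hc
        rw [PySem.Chars.rfind.go.eq_2, if_pos this]
      · have hple : p ≤ j := by omega
        have hpre : ¬ ([c].isPrefixOf (s.drop (j + 1)) = true) := by
          rw [pv_singleton_isPrefixOf]
          simpa using hlast (j + 1) (by omega) (le_refl _)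
        rw [PySem.Chars.rfind.go.eq_2, if_neg hpre]
        exact ih hple (fun j' h1 h2 => hlast j' h1 (by omega))

theorem pv_rfind_single (s : List Char) (c : Char) (p : Nat)
    (hc : s[p]? = some c) (hlast : ∀ j, p < j → s[j]? ≠ some c) :
    PySem.Chars.rfind s [c] = (p : Int) := by
  have hp : p < s.length := by
    by_contra h
    push_neg at h
    rw [List.getElem?_eq_none h] at hc
    simp at hc
  exact pv_rfind_go s c s.length p (by omega) hc (fun j h1 _ => hlast j h1)

theorem pv_take_snoc (full : List Char) (start i : Nat) (h1 : start ≤ i) (h2 : i < full.length) :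
    (full.drop start).take (i - start) ++ [full[i]] = (full.drop start).take (i + 1 - start) := by
  have he : i + 1 - start = (i - start) + 1 := by omega
  rw [he, List.take_add_one]
  have hg : (full.drop start)[i - start]? = some full[i] := by
    rw [List.getElem?_drop]
    have hadd : start + (i - start) = i := by omega
    rw [hadd, List.getElem?_eq_getElem h2]
  rw [hg]
  simp

theorem pv_startswith_lt_slash (x : Char) (X : List Char) :
    PySem.Chars.startswith ('<' :: x :: X) ['<', '/'] = (x == '/') := by
  cases X <;> simp [PySem.Chars.startswith, List.isPrefixOf, eq_comm]

theorem pv_endswith_slash_gt (x : Char) (Y : List Char) :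
    PySem.Chars.endswith ((Y ++ [x]) ++ ['>']) ['/', '>'] = (x == '/') := by
  cases h : Y.reverse <;>
    simp [PySem.Chars.endswith, List.isSuffixOf, List.reverse_append, List.isPrefixOf, h, eq_comm]

theorem pv_rstrip_gt (T : List Char) : PySem.Chars.rstrip (T ++ ['>']) = T ++ ['>'] := by
  simp [PySem.Chars.rstrip, List.reverse_append,
    show PySem.Chars.isspace '>' = false from rfl]

theorem pv_main (cs full : List Char) (i start : Nat) (lastLt : Int) (it ie : Bool)
    (out : List String)
    (hcs : cs = full.drop i) (hstart : start ≤ i) (hi : i ≤ full.length)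
    (htag : it = true → ∃ ℓ : Nat, lastLt = (ℓ : Int) ∧ start ≤ ℓ ∧ ℓ < i ∧
      full[ℓ]? = some '<' ∧ ∀ j, ℓ < j → j < i → full[j]? ≠ some '<') :
    pvB_loop full cs i out start lastLt it ie
      = out ++ pvA_loop cs ((full.drop start).take (i - start)) it ie := by
  induction cs generalizing i start lastLt it ie out with
  | nil =>
      have hlen : full.length ≤ i := List.drop_eq_nil_iff.mp hcs.symm
      have hbuf : (full.drop start).take (i - start) = full.drop start :=
        List.take_of_length_le (by simp; omega)
      simp only [pvA_loop, pvB_loop]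
      rw [hbuf, PySem.List.slice_from_natCast]
      by_cases hs : start < full.length
      · rw [if_pos hs, if_pos (by rw [Ne, List.drop_eq_nil_iff]; omega)]
      · rw [if_neg hs, if_neg (by simp only [ne_eq, not_not]; rw [List.drop_eq_nil_iff]; omega),
          List.append_nil]
  | cons c rest ih =>
      have hlen : i < full.length := by
        by_contra hcon
        rw [List.drop_eq_nil_of_le (by omega)] at hcs
        cases hcs
      rw [List.drop_eq_getElem_cons hlen] at hcs
      injection hcs with hc hrest
      have hbufs := pv_take_snoc full start i hstart hlen
      rw [← hc] at hbufs
      simp only [pvA_loop, pvB_loop]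
      by_cases hgt : c = '>' ∧ it = true
      · rw [if_pos hgt, if_pos hgt]
        obtain ⟨ℓ, hll, hsl, hli, hlc, hnol⟩ := htag hgt.2
        have hfl : full[ℓ] = '<' := by
          rw [List.getElem?_eq_getElem (show ℓ < full.length by omega)] at hlc
          exact Option.some.inj hlc
        rw [hbufs]
        have hrf : PySem.Chars.rfind ((full.drop start).take (i + 1 - start)) ['<']
            = ((ℓ - start : Nat) : Int) := by
          refine pv_rfind_single _ _ (ℓ - start) ?_ ?_
          · rw [List.getElem?_take_of_lt (by omega : ℓ - start < i + 1 - start), List.getElem?_drop]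
            have hadd : start + (ℓ - start) = ℓ := by omega
            rw [hadd]
            rw [List.getElem?_eq_getElem (show ℓ < full.length by omega), hfl]
          · intro j hj
            by_cases hjb : j < i + 1 - start
            · rw [List.getElem?_take_of_lt hjb, List.getElem?_drop]
              by_cases hji : start + j = i
              · rw [hji, List.getElem?_eq_getElem hlen, ← hc, hgt.1]
                simp
              · exact hnol (start + j) (by omega) (by omega)
            · rw [List.getElem?_eq_none (by simp [List.length_take, List.length_drop]; omega)]
              simp
        rw [hrf]
        have hsl2 : PySem.Chars.slice ((full.drop start).take (i + 1 - start))
            (some ((ℓ - start : Nat) : Int)) none = (full.drop ℓ).take (i + 1 - ℓ) := by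
          rw [PySem.Chars.slice_eq_listSlice, PySem.List.slice_from_natCast, List.drop_take,
            List.drop_drop]
          rw [show start + (ℓ - start) = ℓ by omega,
            show i + 1 - start - (ℓ - start) = i + 1 - ℓ by omega]
        rw [hsl2]
        have hl1len : ℓ + 1 < full.length := by omega
        have hconsd : (full.drop ℓ).take (i + 1 - ℓ)
            = '<' :: full[ℓ + 1] :: (full.drop (ℓ + 2)).take (i - 1 - ℓ) := by
          rw [List.drop_eq_getElem_cons (show ℓ < full.length by omega), hfl,
            List.drop_eq_getElem_cons hl1len]
          have he : i + 1 - ℓ = (i - 1 - ℓ) + 1 + 1 := by omega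
          rw [he, List.take_succ_cons, List.take_succ_cons]
        have hsnoc : (full.drop ℓ).take (i + 1 - ℓ)
            = ((full.drop ℓ).take (i - 1 - ℓ) ++ [full[i - 1]]) ++ ['>'] := by
          have h1 := pv_take_snoc full ℓ i (by omega) hlen
          have h2 := pv_take_snoc full ℓ (i - 1) (by omega) (by omega)
          have hii : i - 1 + 1 = i := by omega
          rw [hii] at h2
          rw [← h1, ← h2, ← hc, hgt.1]
        have hA1 : PySem.Chars.startswith ((full.drop ℓ).take (i + 1 - ℓ)) ['<', '/']
            = (full[ℓ + 1] == '/') := by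
          rw [hconsd]; exact pv_startswith_lt_slash _ _
        have hA2 : PySem.Chars.endswith (PySem.Chars.rstrip ((full.drop ℓ).take (i + 1 - ℓ)))
            ['/', '>'] = (full[i - 1] == '/') := by
          rw [hsnoc, pv_rstrip_gt, pv_endswith_slash_gt]
        have hB1 : PySem.List.pyGet? full (lastLt + 1) = some full[ℓ + 1] := by
          rw [hll]
          have he : (ℓ : Int) + 1 = ((ℓ + 1 : Nat) : Int) := by push_cast; ring
          rw [he, PySem.List.pyGet?_natCast, List.getElem?_eq_getElem hl1len]
        have hB2 : PySem.List.pyGet? full ((i : Int) - 1) = some full[i - 1] := by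
          have he : (i : Int) - 1 = ((i - 1 : Nat) : Int) := by omega
          rw [he, PySem.List.pyGet?_natCast, List.getElem?_eq_getElem (by omega)]
        rw [hA1, hA2, hB1, hB2]
        simp only [Option.some.injEq, beq_iff_eq]
        exact ih (i + 1) start lastLt false _ out hrest (by omega) (by omega)
          (fun h => absurd h (by simp))
      · rw [if_neg hgt, if_neg hgt]
        by_cases hlt2 : c = '<'
        · subst hlt2
          simp only [reduceIte]
          rw [if_neg (by simp), if_neg (by simp), hbufs]
          exact ih (i + 1) start ((i : Nat) : Int) true ie out hrest (by omega) (by omega)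
            (fun _ => ⟨i, rfl, hstart, by omega,
              by rw [List.getElem?_eq_getElem hlen, ← hc],
              fun j h1 h2 => by omega⟩)
        · simp only [if_neg hlt2]
          have hmem : (c ∈ pvSplittersB) ↔ (c ∈ pvSplittersA) := by
            rw [show pvSplittersB = pvSplittersA from rfl]
          by_cases hsp : it = false ∧ ie = false ∧ c ∈ pvSplittersA
          · rw [if_pos hsp, if_pos ⟨hsp.1, hsp.2.1, hmem.mpr hsp.2.2⟩]
            have hchunk : PySem.List.slice full (some (start : Int)) (some ((i : Int) + 1))
                = (full.drop start).take (i - start) ++ [c] := by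
              have he : (i : Int) + 1 = ((i + 1 : Nat) : Int) := by push_cast; ring
              rw [he, PySem.List.slice_natCast]
              exact hbufs.symm
            rw [hchunk]
            have hemp : ((full.drop start).take (i - start) ++ [c] = [' '])
                ↔ (start = i ∧ c = ' ') := by
              have hdn : ¬ full.drop start = [] := by rw [List.drop_eq_nil_iff]; omega
              constructor
              · intro h
                cases hX : (full.drop start).take (i - start) with
                | nil =>
                    rw [hX] at h
                    simp only [List.nil_append, List.cons.injEq, and_true] at h
                    rw [List.take_eq_nil_iff] at hX
                    have hse : start = i := by
                      rcases hX with hX' | hX'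
                      · omega
                      · exact absurd hX' hdn
                    exact ⟨hse, h⟩
                | cons a t =>
                    rw [hX] at h
                    simp only [List.cons_append, List.cons.injEq] at h
                    exact absurd h.2 (by simp)
              · rintro ⟨h1, h2⟩
                subst h1
                subst h2
                simp
            by_cases hy : start = i ∧ c = ' '
            · rw [if_neg (not_not_intro (hemp.mpr hy)), if_neg (not_not_intro hy)]
              have hih := ih (i + 1) (i + 1) lastLt it ie out hrest (le_refl _) (by omega)
                (fun h => absurd h (by simp [hsp.1]))
              rw [hih]
              simp
            · rw [if_pos (fun hcon => hy (hemp.mp hcon)), if_pos hy]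
              have hih := ih (i + 1) (i + 1) lastLt it ie
                (out ++ [String.mk (PySem.Chars.strip ((full.drop start).take (i - start) ++ [c])
                  ++ [' '])])
                hrest (le_refl _) (by omega) (fun h => absurd h (by simp [hsp.1]))
              rw [hih]
              simp
          · rw [if_neg hsp, if_neg (fun hB => hsp ⟨hB.1, hB.2.1, hmem.mp hB.2.2⟩), hbufs]
            exact ih (i + 1) start lastLt it ie out hrest (by omega) (by omega)
              (fun hit => by
                obtain ⟨ℓ, hll, hsl, hli, hlc, hnol⟩ := htag hit
                exact ⟨ℓ, hll, hsl, by omega, hlc, fun j h1 h2 => by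
                  by_cases hji : j = i
                  · rw [hji, List.getElem?_eq_getElem hlen, ← hc]
                    intro hcc
                    exact hlt2 (Option.some.inj hcc)
                  · exact hnol j h1 (by omega)⟩)

-- ===== VERDICT (by name: the statement is the Claim_ definition above) =====
theorem text_chunker_spec : Claim_equal_text_chunker := by
  intro text _
  unfold Spec_text_chunker text_chunker text_chunker_alt
  have h := pv_main text.toList text.toList 0 0 (-1) false false []
    (by simp) (le_refl 0) (Nat.zero_le _) (by simp)
  simpa using h.symm
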